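-- pv_equiv track=rewrite | github.com/r1nlaw/Python-for-data-analysis | contest_01/19.py | find_repeated_words
-- ===== SOURCE A (Python) =====
-- def find_repeated_words(text):
--     words = text.split()
--     word_count = {}
--
--
--     for word in words:
--         if word == "end":
--             break
--         if word in word_count:
--             word_count[word] += 1
--         else:
--             word_count[word] = 1
--
--     repeated_words = []
--     for word, count in word_count.items():
--         if count > 1:
--             repeated_words.append(word)
--
--
--     repeated_words.sort()
--
--     return ' '.join(repeated_words)
-- ===== SOURCE B (Python) =====
-- def find_repeated_words(text):
--     words = []
--     for w in text.split():
--         if w == "end":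
--             break
--         words.append(w)
--     words.sort()
--     res = []
--     prevprev = None
--     prev = None
--     for w in words:
--         if prev == w and prevprev != w:
--             res.append(w)
--         prevprev = prev
--         prev = w
--     return ' '.join(res)
-- ===== Notes on version B (the rewrite author's own statement) =====
-- stated objective: alternative
-- what changed: Replaces the counting dictionary with sort-then-adjacent-scan: B cuts the word list at 'end', sorts it, and a single pass emits each word that equals its predecessor but not its pre-predecessor, so the result is already sorted and deduplicated.
import Mathlib
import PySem

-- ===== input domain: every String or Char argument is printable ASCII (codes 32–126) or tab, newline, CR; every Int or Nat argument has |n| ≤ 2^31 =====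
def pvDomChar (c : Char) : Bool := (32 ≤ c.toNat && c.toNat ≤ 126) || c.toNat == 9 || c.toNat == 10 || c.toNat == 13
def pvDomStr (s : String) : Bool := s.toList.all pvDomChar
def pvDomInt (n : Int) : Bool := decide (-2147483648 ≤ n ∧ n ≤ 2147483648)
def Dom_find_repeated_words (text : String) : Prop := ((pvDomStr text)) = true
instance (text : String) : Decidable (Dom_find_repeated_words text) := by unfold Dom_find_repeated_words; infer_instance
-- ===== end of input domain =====

-- B replaces A's counting dictionary with sort-then-adjacent-scan (alternative decomposition, same cost).

-- ===== PORT A =====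
-- A's first loop: count words into the dict, breaking at "end".
def pvAcount : List String → PySem.Dict String Int → PySem.Dict String Int
  | [], d => d
  | w :: ws, d =>
    if w == "end" then d
    else pvAcount ws (if d.contains w then d.insert w (d.getD w 0 + 1) else d.insert w 1)

def find_repeated_words (text : String) : String :=
  let words := PySem.Str.split₀ text
  let word_count := pvAcount words PySem.Dict.empty
  let repeated_words :=
    word_count.items.foldl (fun acc wc => if wc.2 > 1 then acc ++ [wc.1] else acc) []
  PySem.Str.join " " (PySem.List.sorted repeated_words (fun x => x))

-- ===== PORT B =====
-- B's first loop: collect the words before "end".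
def pvBtake : List String → List String → List String
  | [], acc => acc
  | w :: ws, acc => if w == "end" then acc else pvBtake ws (acc ++ [w])

-- B's scan step: state is (prevprev, prev, res).
def pvBstep (st : Option String × Option String × List String) (w : String) :
    Option String × Option String × List String :=
  (st.2.1, some w, if st.2.1 == some w && !(st.1 == some w) then st.2.2 ++ [w] else st.2.2)

def find_repeated_words_alt (text : String) : String :=
  let words := PySem.List.sorted (pvBtake (PySem.Str.split₀ text) []) (fun x => x)
  let res := (words.foldl pvBstep (none, none, [])).2.2
  PySem.Str.join " " res

-- ===== PRECONDITION & SPEC =====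
def Spec_find_repeated_words (text : String) (out : String) : Prop := out = find_repeated_words_alt text
instance (text : String) (out : String) : Decidable (Spec_find_repeated_words text out) := by unfold Spec_find_repeated_words; infer_instance

-- ===== CLAIM (what is proved, stated in full; the proofs are below) =====
def Claim_equal_find_repeated_words : Prop := ∀ (text : String), Dom_find_repeated_words text → Spec_find_repeated_words text (find_repeated_words text)

-- ===== LEMMAS AND PROOFS =====

-- the recursive view of B's scan
def pvScan : Option String → Option String → List String → List String
  | _, _, [] => []
  | pp, p, w :: ws => (if p = some w ∧ pp ≠ some w then [w] else []) ++ pvScan p (some w) ws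

-- the sorted-duplicates extractor both sides are reduced to
def pvDups : List String → List String
  | [] => []
  | a :: t =>
    if t.head? = some a then a :: pvDups (t.dropWhile (· == a)) else pvDups t
termination_by s => s.length
decreasing_by
  · have := List.length_dropWhile_le (p := (· == a)) (l := t); simp; omega
  · simp

lemma pvBtake_eq_takeWhile (ws acc : List String) :
    pvBtake ws acc = acc ++ ws.takeWhile (fun w => !(w == "end")) := by
  induction ws generalizing acc with
  | nil => simp [pvBtake]
  | cons w ws ih =>
    by_cases h : w = "end" <;> simp [pvBtake, h, ih]

lemma pvBstep_foldl (s : List String) (pp p : Option String) (res : List String) :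
    (s.foldl pvBstep (pp, p, res)).2.2 = res ++ pvScan pp p s := by
  induction s generalizing pp p res with
  | nil => simp [pvScan]
  | cons w ws ih =>
    have : (pvBstep (pp, p, res) w) =
        (p, some w, if p = some w ∧ pp ≠ some w then res ++ [w] else res) := by
      simp only [pvBstep]
      by_cases h1 : p = some w <;> by_cases h2 : pp = some w <;> simp [h1, h2]
    simp only [List.foldl_cons, this]
    by_cases h : p = some w ∧ pp ≠ some w <;> simp [h, ih, pvScan]

lemma pvScan_eq_pvDups_of_state (t : List String) :
    ∀ (a : String) (pp : Option String),
    pvScan pp (some a) t =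
      if pp = some a then pvDups (t.dropWhile (· == a))
      else if t.head? = some a then a :: pvDups (t.dropWhile (· == a)) else pvDups t := by
  induction t with
  | nil => intro a pp; simp [pvScan, pvDups]
  | cons w ws ih =>
    intro a pp
    by_cases h : a = w
    · subst h
      by_cases hpp : pp = some a <;>
        simp [pvScan, hpp, ih a (some a)]
    · have hne : ¬ (some a = some w) := by simp [h]
      have hd : (w :: ws).dropWhile (· == a) = w :: ws := by
        simp [Ne.symm h]
      rw [show pvScan pp (some a) (w :: ws) =
          (if some a = some w ∧ pp ≠ some w then [w] else []) ++ pvScan (some a) (some w) ws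
          from rfl]
      rw [ih w (some a)]
      simp only [hne, false_and, if_false, List.nil_append, hd]
      have : ¬ ((w :: ws).head? = some a) := by simp [Ne.symm h]
      simp only [this, if_false]
      by_cases hpp : pp = some a <;> simp [pvDups]
  termination_by t.length

lemma pvScan_eq_pvDups (s : List String) : pvScan none none s = pvDups s := by
  cases s with
  | nil => simp [pvScan, pvDups]
  | cons a t =>
    have : pvScan none none (a :: t) = pvScan none (some a) t := by simp [pvScan]
    rw [this, pvScan_eq_pvDups_of_state t a none]
    simp [pvDups]

lemma mem_pvDups_subset : ∀ (s : List String) (w : String), w ∈ pvDups s → w ∈ s := by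
  intro s
  induction s using pvDups.induct with
  | case1 => simp [pvDups]
  | case2 a t h ih =>
    intro w hw
    rw [pvDups, if_pos h] at hw
    rcases List.mem_cons.1 hw with h1 | h1
    · exact h1 ▸ List.mem_cons_self
    · exact List.mem_cons_of_mem _ ((List.dropWhile_sublist _).subset (ih w h1))
  | case3 a t h ih =>
    intro w hw
    rw [pvDups, if_neg h] at hw
    exact List.mem_cons_of_mem _ (ih w hw)

lemma lt_of_mem_dropWhile_sorted (t : List String) (a : String)
    (hs : t.Pairwise (· ≤ ·)) (hge : ∀ y ∈ t, a ≤ y) :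
    ∀ w ∈ t.dropWhile (· == a), a < w := by
  intro w hw
  rcases e : t.dropWhile (· == a) with _ | ⟨c, r⟩
  · simp [e] at hw
  · have hc : (c == a) = false := by
      have := List.head?_dropWhile_not (· == a) t
      rw [e] at this; simpa using this
    have hca : c ≠ a := by simpa using hc
    have hct : c ∈ t := (List.dropWhile_sublist _).subset (by rw [e]; exact List.mem_cons_self)
    have hac : a < c := lt_of_le_of_ne (hge c hct) (Ne.symm hca)
    have hpd : (c :: r).Pairwise (fun x y => x ≤ y) := e ▸ List.Pairwise.sublist (List.dropWhile_sublist _) hs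
    rw [e] at hw
    rcases List.mem_cons.1 hw with h1 | h1
    · exact h1 ▸ hac
    · exact lt_of_lt_of_le hac ((List.pairwise_cons.1 hpd).1 w h1)

lemma count_dropWhile_eq (t : List String) (a w : String) (hw : w ≠ a) :
    (t.dropWhile (· == a)).count w = t.count w := by
  conv_rhs => rw [← List.takeWhile_append_dropWhile (p := (· == a)) (l := t)]
  rw [List.count_append]
  have : (t.takeWhile (· == a)).count w = 0 := by
    rw [List.count_eq_zero]
    intro hmem
    have := List.mem_takeWhile_imp hmem
    simp at this
    exact hw this
  omega

lemma mem_pvDups_iff : ∀ (s : List String), s.Pairwise (· ≤ ·) →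
    ∀ w, w ∈ pvDups s ↔ 1 < s.count w := by
  intro s
  induction s using pvDups.induct with
  | case1 => intro _ w; simp [pvDups]
  | case2 a t h ih =>
    intro hs w
    have ht : t.Pairwise (· ≤ ·) := (List.pairwise_cons.1 hs).2
    have hge : ∀ y ∈ t, a ≤ y := (List.pairwise_cons.1 hs).1
    have hd : (t.dropWhile (· == a)).Pairwise (· ≤ ·) := List.Pairwise.sublist (List.dropWhile_sublist _) ht
    rw [pvDups, if_pos h]
    by_cases hwa : w = a
    · subst hwa
      have hat : w ∈ t := by
        rcases t with _ | ⟨b, r⟩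
        · simp at h
        · simp at h; simp [h]
      have : 1 ≤ t.count w := List.one_le_count_iff.2 hat
      simp only [List.count_cons_self]
      constructor
      · intro _; omega
      · intro _; simp
    · rw [List.mem_cons]
      have h1 : ¬ (w = a) := hwa
      rw [List.count_cons_of_ne (Ne.symm hwa)]
      rw [ih hd w, count_dropWhile_eq t a w hwa]
      simp [h1]
  | case3 a t h ih =>
    intro hs w
    have ht : t.Pairwise (· ≤ ·) := (List.pairwise_cons.1 hs).2
    have hge : ∀ y ∈ t, a ≤ y := (List.pairwise_cons.1 hs).1
    rw [pvDups, if_neg h]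
    by_cases hwa : w = a
    · subst hwa
      have hnt : w ∉ t := by
        intro hmem
        rcases t with _ | ⟨b, r⟩
        · simp at hmem
        · have hb : b ≤ w := by
            rcases List.mem_cons.1 hmem with h1 | h1
            · exact le_of_eq h1.symm
            · exact le_of_lt (lt_of_le_of_lt (le_of_eq rfl) (lt_of_le_of_ne ((List.pairwise_cons.1 ht).1 w h1) (fun _ => by simp_all) )) |>.trans (le_refl w) |>.trans (le_refl w)
          have hwb : w ≤ b := hge b (by simp)
          have : b = w := le_antisymm hb hwb
          exact h (by simp [this])
      have hc0 : t.count w = 0 := List.count_eq_zero.2 hnt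
      constructor
      · intro hmem
        exact absurd (mem_pvDups_subset t w hmem) hnt
      · intro hcnt
        rw [List.count_cons_self, hc0] at hcnt; omega
    · rw [List.count_cons_of_ne (Ne.symm hwa)]
      exact ih ht w

lemma pairwise_lt_pvDups : ∀ (s : List String), s.Pairwise (· ≤ ·) →
    (pvDups s).Pairwise (· < ·) := by
  intro s
  induction s using pvDups.induct with
  | case1 => intro _; simp [pvDups]
  | case2 a t h ih =>
    intro hs
    have ht : t.Pairwise (· ≤ ·) := (List.pairwise_cons.1 hs).2
    have hge : ∀ y ∈ t, a ≤ y := (List.pairwise_cons.1 hs).1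
    have hd : (t.dropWhile (· == a)).Pairwise (· ≤ ·) := List.Pairwise.sublist (List.dropWhile_sublist _) ht
    rw [pvDups, if_pos h]
    refine List.pairwise_cons.2 ⟨?_, ih hd⟩
    intro w hw
    exact lt_of_mem_dropWhile_sorted t a ht hge w (mem_pvDups_subset _ w hw)
  | case3 a t h ih =>
    intro hs
    rw [pvDups, if_neg h]
    exact ih (List.pairwise_cons.1 hs).2

-- A-side: the counting loop is Counter of the words before "end"
lemma pvAcount_eq_counter_aux (ws : List String) :
    ∀ d, pvAcount ws d =
      (ws.takeWhile (fun w => !(w == "end"))).foldl (fun d x => d.insert x (d.getD x 0 + 1)) d := by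
  induction ws with
  | nil => intro d; simp [pvAcount]
  | cons w ws ih =>
    intro d
    by_cases h : w = "end"
    · simp [pvAcount, h]
    · have hstep : (if d.contains w then d.insert w (d.getD w 0 + 1) else d.insert w 1)
          = d.insert w (d.getD w 0 + 1) := by
        by_cases hc : d.contains w
        · simp [hc]
        · have : d.getD w 0 = 0 := by
            simp only [PySem.Dict.getD, PySem.Dict.get?]
            have : d.items.find? (fun p => p.1 == w) = none := by
              rw [List.find?_eq_none]
              intro p hp
              by_contra hne
              exact hc (List.any_eq_true.2 ⟨p, hp, by simpa using hne⟩)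
            simp [this]
          simp [hc, this]
      simp [pvAcount, h, hstep, ih]

lemma pvAcount_eq_counter (ws : List String) :
    pvAcount ws PySem.Dict.empty = PySem.Dict.counter (ws.takeWhile (fun w => !(w == "end"))) := by
  rw [pvAcount_eq_counter_aux, PySem.Dict.foldl_insert_getD_add_one_eq_counter]

lemma foldl_append_if_prop (l : List (String × Int)) (acc : List String) :
    l.foldl (fun acc wc => if wc.2 > 1 then acc ++ [wc.1] else acc) acc
      = acc ++ (l.filter (fun wc => 1 < wc.2)).map (·.1) := by
  induction l generalizing acc with
  | nil => simp
  | cons p l ih =>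
    by_cases h : (1 : Int) < p.2 <;>
      simp [h, ih]

-- the central equality of the two word lists
lemma sorted_filter_eq_pvDups (pre : List String) :
    PySem.List.sorted
      ((PySem.Set.ofList pre).filter (fun k => decide (1 < pre.count k)))
      (fun x => x)
    = pvDups (PySem.List.sorted pre (fun x => x)) := by
  apply PySem.List.sorted_eq_of_perm_of_pairwise_lt
  · -- Perm
    have hsp : (PySem.List.sorted pre (fun x => x)).Pairwise (· ≤ ·) := by
      simpa using PySem.List.sorted_pairwise pre (fun x => x)
    have hnod₂ : ((PySem.Set.ofList pre).filter (fun k => decide (1 < pre.count k))).Nodup :=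
      (PySem.Set.nodup_ofList pre).filter _
    have hnod₁ : (pvDups (PySem.List.sorted pre (fun x => x))).Nodup :=
      (pairwise_lt_pvDups _ hsp).imp ne_of_lt
    refine (List.perm_ext_iff_of_nodup hnod₁ hnod₂).2 ?_
    intro w
    rw [mem_pvDups_iff _ hsp w]
    have hcnt : (PySem.List.sorted pre (fun x => x)).count w = pre.count w :=
      (PySem.List.sorted_perm pre (fun x => x) false).count_eq w
    rw [hcnt, List.mem_filter, PySem.Set.mem_ofList]
    constructor
    · intro hlt
      exact ⟨List.count_pos_iff.1 (by omega), by simpa using hlt⟩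
    · rintro ⟨_, hlt⟩
      simpa using hlt
  · exact (pairwise_lt_pvDups _ (by simpa using PySem.List.sorted_pairwise pre (fun x => x)))

-- ===== VERDICT (by name: the statement is the Claim_ definition above) =====
theorem find_repeated_words_spec : Claim_equal_find_repeated_words := by
  intro text _
  unfold Spec_find_repeated_words find_repeated_words find_repeated_words_alt
  dsimp only
  set ws := PySem.Str.split₀ text with hws
  set pre := ws.takeWhile (fun w => !(w == "end")) with hpre
  rw [pvAcount_eq_counter, ← hpre, PySem.Dict.items_counter, foldl_append_if_prop,
    pvBtake_eq_takeWhile, pvBstep_foldl, pvScan_eq_pvDups]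
  simp only [List.nil_append, List.filter_map, List.map_map, ← hpre]
  congr 1
  have : ((PySem.Set.ofList pre).filter
      ((fun wc : String × Int => decide (1 < wc.2)) ∘ fun k => (k, (pre.count k : Int)))).map
        ((fun wc : String × Int => wc.1) ∘ fun k => (k, (pre.count k : Int)))
      = (PySem.Set.ofList pre).filter (fun k => decide (1 < pre.count k)) := by
    simp [Function.comp_def]
  rw [this, sorted_filter_eq_pvDups]
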